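-- pv_equiv track=rewrite | github.com/RHUDHRESH/Intake | frameworks/switch6_engine.py | _derive_keywords
-- ===== SOURCE A (Python) =====
-- from typing import Any, Dict, List, Optional, Sequence, Tuple
--
-- def _derive_keywords(data: Dict[str, Any]) -> List[str]:
--     keywords = []
--     for field in ("business_industry", "primary_goal", "main_challenge", "what_you_do"):
--         value = data.get(field)
--         if isinstance(value, str) and value:
--             for token in value.split():
--                 if len(token) > 3:
--                     keywords.append(token.lower())
--     unique = list(dict.fromkeys(keywords))
--     return unique[:3] if unique else ["growth"]
-- ===== SOURCE B (Python) =====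
-- def _derive_keywords(data):
--     result = []
--     for field in ("business_industry", "primary_goal", "main_challenge", "what_you_do"):
--         value = data.get(field)
--         if isinstance(value, str) and value:
--             for token in value.split():
--                 if len(token) > 3:
--                     lowered = token.lower()
--                     if lowered not in result:
--                         result.append(lowered)
--                         if len(result) == 3:
--                             return result
--     return result if result else ["growth"]
-- ===== Notes on version B (the rewrite author's own statement) =====
-- stated objective: alternative
-- what changed: Replaces A's three phases (collect all long tokens, dedup via dict.fromkeys, slice [:3]) with a single fused pass that appends each new lowered token at most once and returns as soon as 3 keywords are found.
import Mathlib
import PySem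

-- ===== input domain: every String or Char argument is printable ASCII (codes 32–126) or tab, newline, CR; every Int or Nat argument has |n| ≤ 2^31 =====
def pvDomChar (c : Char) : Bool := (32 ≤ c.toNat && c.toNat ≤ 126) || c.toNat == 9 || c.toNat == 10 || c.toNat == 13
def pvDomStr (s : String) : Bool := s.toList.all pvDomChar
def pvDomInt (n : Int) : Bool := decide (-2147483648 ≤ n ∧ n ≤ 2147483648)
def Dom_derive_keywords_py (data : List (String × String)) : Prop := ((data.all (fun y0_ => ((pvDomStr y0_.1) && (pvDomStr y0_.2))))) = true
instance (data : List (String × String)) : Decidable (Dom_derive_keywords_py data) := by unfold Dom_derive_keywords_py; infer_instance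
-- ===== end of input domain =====

-- B fuses A's collect / dedup-via-dict.fromkeys / slice phases into one early-terminating
-- pass that appends each new lowered token at most once and returns once 3 keywords exist.

-- ===== PORT A =====
-- A: collect ALL lowered tokens of length > 3 from the four fields, then dedup (dict.fromkeys), then [:3].
def derive_keywords_py (data : List (String × String)) : List String :=
  let keywords :=
    ["business_industry", "primary_goal", "main_challenge", "what_you_do"].foldl
      (fun acc field =>
        match data.lookup field with           -- data.get(field): first match in the assoc list
        | some value =>
            -- isinstance(value, str) is always true here; 'and value' = non-empty
            if value.toList ≠ [] then
              (PySem.Chars.split₀ value.toList).foldl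
                (fun acc2 token =>
                  if 3 < token.length then acc2 ++ [String.ofList (PySem.Chars.lower token)] else acc2)
                acc
            else acc
        | none => acc)
      []
  let unique := PySem.List.dedup keywords
  if unique ≠ [] then unique.take 3 else ["growth"]

-- ===== PORT B =====
-- inner token loop; Bool = early 'return result' fired (len(result) == 3)
def pvAltTok (toks : List (List Char)) (res : List String) : Bool × List String :=
  match toks with
  | [] => (false, res)
  | t :: rest =>
    if 3 < t.length then
      let lowered := String.ofList (PySem.Chars.lower t)
      if lowered ∈ res then pvAltTok rest res
      else
        let res' := res ++ [lowered]
        if res'.length = 3 then (true, res') else pvAltTok rest res'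
    else pvAltTok rest res

-- outer loop over the four fields, propagating the early return
def pvAltFields (fields : List String) (data : List (String × String)) (res : List String) :
    Bool × List String :=
  match fields with
  | [] => (false, res)
  | f :: rest =>
    let toks :=
      match data.lookup f with
      | some value => if value.toList ≠ [] then PySem.Chars.split₀ value.toList else []
      | none => []
    match pvAltTok toks res with
    | (true, r) => (true, r)
    | (false, r) => pvAltFields rest data r

def derive_keywords_py_alt (data : List (String × String)) : List String :=
  let r := (pvAltFields ["business_industry", "primary_goal", "main_challenge", "what_you_do"] data []).2
  if r ≠ [] then r else ["growth"]

-- ===== PRECONDITION & SPEC =====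
def Spec_derive_keywords_py (data : List (String × String)) (out : List String) : Prop := out = derive_keywords_py_alt data
instance (data : List (String × String)) (out : List String) : Decidable (Spec_derive_keywords_py data out) := by unfold Spec_derive_keywords_py; infer_instance

-- ===== CLAIM (what is proved, stated in full; the proofs are below) =====
def Claim_equal_derive_keywords_py : Prop := ∀ (data : List (String × String)), Dom_derive_keywords_py data → Spec_derive_keywords_py data (derive_keywords_py data)

-- ===== LEMMAS AND PROOFS =====

-- the per-field token list A and B both read (lookup, non-empty guard, split)
def pvRaw (data : List (String × String)) (f : String) : List (List Char) :=
  match data.lookup f with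
  | some value => if value.toList ≠ [] then PySem.Chars.split₀ value.toList else []
  | none => []

-- the long tokens of a field, lowered (what both programs feed their dedup with)
def pvG (data : List (String × String)) (f : String) : List String :=
  ((pvRaw data f).filter (fun t => decide (3 < t.length))).map
    (fun t => String.ofList (PySem.Chars.lower t))

-- abstract form of B's inner loop: take fresh elements until the result reaches 3
def pvTD (res L : List String) : Bool × List String :=
  match L with
  | [] => (false, res)
  | x :: xs =>
    if x ∈ res then pvTD res xs
    else if (res ++ [x]).length = 3 then (true, res ++ [x]) else pvTD (res ++ [x]) xs

lemma pvA_keywords (fields : List String) (data : List (String × String)) (acc : List String) :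
    fields.foldl
      (fun acc field =>
        match data.lookup field with
        | some value =>
            if value.toList ≠ [] then
              (PySem.Chars.split₀ value.toList).foldl
                (fun acc2 token =>
                  if 3 < token.length then acc2 ++ [String.ofList (PySem.Chars.lower token)] else acc2)
                acc
            else acc
        | none => acc)
      acc
    = acc ++ fields.flatMap (pvG data) := by
  induction fields generalizing acc with
  | nil => simp
  | cons f rest ih =>
    have hstep :
        (match data.lookup f with
          | some value =>
              if value.toList ≠ [] then
                (PySem.Chars.split₀ value.toList).foldl
                  (fun acc2 token =>
                    if 3 < token.length then acc2 ++ [String.ofList (PySem.Chars.lower token)] else acc2)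
                  acc
              else acc
          | none => acc)
        = acc ++ pvG data f := by
      unfold pvG pvRaw
      cases data.lookup f with
      | none => simp
      | some value =>
        by_cases hv : value.toList = [] <;>
          simp [hv, PySem.List.foldl_append_ite (p := fun t => 3 < List.length t)]
    simp only [List.foldl_cons, hstep, ih, List.flatMap_cons, List.append_assoc]

lemma pvAltTok_eq (toks : List (List Char)) (res : List String) :
    pvAltTok toks res
      = pvTD res ((toks.filter (fun t => decide (3 < t.length))).map
          (fun t => String.ofList (PySem.Chars.lower t))) := by
  induction toks generalizing res with
  | nil => simp [pvAltTok, pvTD]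
  | cons t rest ih =>
    by_cases ht : 3 < t.length
    · by_cases hm : String.ofList (PySem.Chars.lower t) ∈ res
      · simp [pvAltTok, pvTD, ht, hm, ih]
      · by_cases h3 : (res ++ [String.ofList (PySem.Chars.lower t)]).length = 3 <;>
          simp [pvAltTok, pvTD, ht, hm, h3, ih]
    · simp [pvAltTok, ht, ih]

lemma pvTD_append (a b res : List String) :
    pvTD res (a ++ b)
      = match pvTD res a with
        | (true, r) => (true, r)
        | (false, r) => pvTD r b := by
  induction a generalizing res with
  | nil => simp [pvTD]
  | cons x xs ih =>
    by_cases hm : x ∈ res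
    · simp [pvTD, hm, ih]
    · by_cases h2 : res.length = 2
      · simp [pvTD, hm, h2]
      · simp [pvTD, hm, h2, ih]

lemma pvAltFields_eq (fields : List String) (data : List (String × String)) (res : List String) :
    pvAltFields fields data res = pvTD res (fields.flatMap (pvG data)) := by
  induction fields generalizing res with
  | nil => simp [pvAltFields, pvTD]
  | cons f rest ih =>
    have : pvAltTok (pvRaw data f) res = pvTD res (pvG data f) := by
      unfold pvG; exact pvAltTok_eq _ _
    simp only [pvAltFields, List.flatMap_cons, pvTD_append]
    unfold pvRaw at this
    rw [this]
    cases h : pvTD res (pvG data f) with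
    | mk done r => cases done <;> simp [ih]

lemma pvFilter_ofList (l : List String) (p : String → Bool) :
    (PySem.Set.ofList l).filter p = PySem.Set.ofList (l.filter p) := by
  induction l with
  | nil => simp
  | cons y ys ih =>
    have hd : ∀ s : List String, PySem.Set.discard s y = s.filter (fun z => !(z == y)) :=
      fun s => rfl
    by_cases hp : p y
    · simp only [PySem.Set.ofList_cons, List.filter_cons, hp, if_pos, hd]
      rw [← ih, List.filter_comm]
    · simp only [PySem.Set.ofList_cons, List.filter_cons, hp, if_neg, Bool.false_eq_true,
        not_false_eq_true, hd]
      rw [← ih, List.filter_filter]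
      apply List.filter_congr
      intro z _
      by_cases hz : z = y
      · subst hz; simp [hp]
      · simp [hz]

lemma pvTD_snd (L res : List String) (h : res.length < 3) :
    (pvTD res L).2
      = (res ++ PySem.Set.ofList (L.filter (fun x => decide (x ∉ res)))).take 3 := by
  induction L generalizing res with
  | nil =>
    simp [pvTD, List.take_of_length_le (le_of_lt h)]
  | cons x xs ih =>
    by_cases hm : x ∈ res
    · simp only [pvTD, List.filter_cons, hm]
      simpa using ih res h
    · have hfx : List.filter (fun y => decide (y ∉ res)) (x :: xs)
          = x :: xs.filter (fun y => decide (y ∉ res)) := by simp [hm]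
      have hcons : PySem.Set.ofList (x :: xs.filter (fun y => decide (y ∉ res)))
          = x :: PySem.Set.discard (PySem.Set.ofList (xs.filter (fun y => decide (y ∉ res)))) x :=
        PySem.Set.ofList_cons x _
      have hdisc : PySem.Set.discard (PySem.Set.ofList (xs.filter (fun y => decide (y ∉ res)))) x
          = PySem.Set.ofList (xs.filter (fun y => decide (y ∉ res ++ [x]))) := by
        have hd : PySem.Set.discard (PySem.Set.ofList (xs.filter (fun y => decide (y ∉ res)))) x
            = (PySem.Set.ofList (xs.filter (fun y => decide (y ∉ res)))).filter
                (fun z => !(z == x)) := rfl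
        rw [hd, pvFilter_ofList, List.filter_filter]
        congr 1
        apply List.filter_congr
        intro z _
        by_cases hzx : z = x
        · subst hzx; simp
        · by_cases hzr : z ∈ res <;> simp [hzx, hzr]
      by_cases h3 : (res ++ [x]).length = 3
      · have hlen : res.length = 2 := by simpa using h3
        obtain ⟨a, b, rfl⟩ : ∃ a b, res = [a, b] := by
          match res, hlen with
          | [a, b], _ => exact ⟨a, b, rfl⟩
        rw [hfx, hcons]
        simp [pvTD, hm]
      · have hlt : (res ++ [x]).length < 3 := by
          simp only [List.length_append, List.length_cons, List.length_nil] at h3 ⊢; omega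
        simp only [pvTD, if_neg hm, if_neg h3, hfx, hcons, hdisc]
        rw [ih (res ++ [x]) hlt]
        simp [List.append_assoc]

-- ===== VERDICT (by name: the statement is the Claim_ definition above) =====
theorem derive_keywords_py_spec : Claim_equal_derive_keywords_py := by
  intro data _
  unfold Spec_derive_keywords_py derive_keywords_py derive_keywords_py_alt
  set fields : List String :=
    ["business_industry", "primary_goal", "main_challenge", "what_you_do"] with hf
  have hA := pvA_keywords fields data []
  have hB := pvAltFields_eq fields data []
  have hTD := pvTD_snd (fields.flatMap (pvG data)) [] (by simp)
  simp only [List.nil_append] at hA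
  rw [hA, hB, hTD]
  simp only [List.not_mem_nil, not_false_eq_true, decide_true, List.filter_true,
    List.nil_append, PySem.List.dedup_eq_ofList]
  cases hofl : PySem.Set.ofList (fields.flatMap (pvG data)) with
  | nil => simp
  | cons a l => simp
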